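-- pv_equiv track=rewrite | github.com/LeeDohoun/HQA_Project | src/rag/source_registry.py | split_sources
-- ===== SOURCE A (Python) =====
-- from typing import Iterable, List, Set
--
-- DEFAULT_MARKET_SOURCES: Set[str] = {"chart", "quote", "krx", "fdr"}
--
-- def is_market_source(source_type: str) -> bool:
--     return (source_type or "").strip().lower() in DEFAULT_MARKET_SOURCES
--
-- def split_sources(source_types: Iterable[str]) -> tuple[List[str], List[str]]:
--     document_sources: List[str] = []
--     market_sources: List[str] = []
--     for source_type in source_types:
--         source = (source_type or "").strip().lower()
--         if not source:
--             continue
--         if is_market_source(source):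
--             if source not in market_sources:
--                 market_sources.append(source)
--         else:
--             if source not in document_sources:
--                 document_sources.append(source)
--     return document_sources, market_sources
-- ===== SOURCE B (Python) =====
-- from typing import Iterable, List, Set
--
-- DEFAULT_MARKET_SOURCES: Set[str] = {"chart", "quote", "krx", "fdr"}
--
-- def is_market_source(source_type: str) -> bool:
--     return (source_type or "").strip().lower() in DEFAULT_MARKET_SOURCES
--
-- def split_sources(source_types: Iterable[str]) -> tuple[List[str], List[str]]:
--     uniq = list(dict.fromkeys(
--         s for st in source_types if (s := (st or "").strip().lower())))
--     document = [s for s in uniq if not is_market_source(s)]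
--     market = [s for s in uniq if is_market_source(s)]
--     return document, market
-- ===== Notes on version B (the rewrite author's own statement) =====
-- stated objective: faster
-- what changed: Replaces the single branching loop with inline 'not in list' dedup by one dict.fromkeys dedup pass over the normalized non-empty sources followed by two filtering comprehensions.
import Mathlib
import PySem

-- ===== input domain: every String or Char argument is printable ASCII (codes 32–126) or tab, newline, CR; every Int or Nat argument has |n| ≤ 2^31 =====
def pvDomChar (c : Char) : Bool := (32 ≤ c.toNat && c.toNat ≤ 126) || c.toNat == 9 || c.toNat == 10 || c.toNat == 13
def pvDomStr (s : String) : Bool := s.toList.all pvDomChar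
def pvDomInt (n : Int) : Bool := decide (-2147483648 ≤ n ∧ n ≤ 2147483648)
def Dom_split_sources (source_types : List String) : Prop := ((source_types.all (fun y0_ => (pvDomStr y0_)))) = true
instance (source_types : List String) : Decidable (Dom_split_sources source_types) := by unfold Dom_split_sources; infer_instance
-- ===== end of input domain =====

-- B replaces A's single branching loop with inline 'not in list' dedup by one
-- ordered dict-based dedup pass over the normalized non-empty sources followed
-- by two filtering passes (objective: faster, measured).


-- ===== PORT A =====
def DEFAULT_MARKET_SOURCES : PySem.Set String :=
  PySem.Set.ofList ["chart", "quote", "krx", "fdr"]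

-- `(source_type or "")` on a string equals the string itself when non-empty and "" otherwise,
-- which strip/lower map to the same result as the string itself; ported as the string.
def is_market_source (source_type : String) : Bool :=
  PySem.Set.contains DEFAULT_MARKET_SOURCES (PySem.Str.lower (PySem.Str.strip source_type))

def split_sources (source_types : List String) : List String × List String :=
  source_types.foldl
    (fun (acc : List String × List String) source_type =>
      let source := PySem.Str.lower (PySem.Str.strip source_type)
      if source = "" then acc
      else if is_market_source source then
        (acc.1, if source ∈ acc.2 then acc.2 else acc.2 ++ [source])
      else
        (if source ∈ acc.1 then acc.1 else acc.1 ++ [source], acc.2))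
    ([], [])

-- ===== PORT B =====
def split_sources_alt (source_types : List String) : List String × List String :=
  let uniq := PySem.List.dedup
    ((source_types.map (fun st => PySem.Str.lower (PySem.Str.strip st))).filter
      (fun s => !(s == "")))
  (uniq.filter (fun s => !is_market_source s), uniq.filter (fun s => is_market_source s))

-- ===== PRECONDITION & SPEC =====
def Spec_split_sources (source_types : List String) (out : List String × List String) : Prop := out = split_sources_alt source_types
instance (source_types : List String) (out : List String × List String) : Decidable (Spec_split_sources source_types out) := by unfold Spec_split_sources; infer_instance

-- ===== CLAIM (what is proved, stated in full; the proofs are below) =====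
def Claim_equal_split_sources : Prop := ∀ (source_types : List String), Dom_split_sources source_types → Spec_split_sources source_types (split_sources source_types)

-- ===== LEMMAS AND PROOFS =====

-- A's inline "if source not in lst: lst.append(source)" is PySem.Set.add.
theorem pv_mem_append_eq_add {s : List String} {x : String} :
    (if x ∈ s then s else s ++ [x]) = PySem.Set.add s x := by
  simp [PySem.Set.add, PySem.Set.contains]

-- filter commutes with Set.add
theorem pv_filter_add_pos (p : String → Bool) (s : List String) (x : String) (hx : p x = true) :
    (PySem.Set.add s x).filter p = PySem.Set.add (s.filter p) x := by
  simp only [PySem.Set.add, PySem.Set.contains]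
  by_cases h : x ∈ s
  · simp [h, List.mem_filter, hx]
  · simp [h, List.mem_filter, hx, List.filter_append, List.filter]

theorem pv_filter_add_neg (p : String → Bool) (s : List String) (x : String) (hx : p x = false) :
    (PySem.Set.add s x).filter p = s.filter p := by
  simp only [PySem.Set.add, PySem.Set.contains]
  by_cases h : x ∈ s
  · simp [h]
  · simp [h, List.filter_append, List.filter, hx]

theorem pv_filter_foldl_add (p : String → Bool) :
    ∀ (l acc : List String),
      (l.foldl PySem.Set.add acc).filter p = (l.filter p).foldl PySem.Set.add (acc.filter p) := by
  intro l
  induction l with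
  | nil => intro acc; rfl
  | cons x t ih =>
    intro acc
    by_cases hx : p x = true
    · simp only [List.foldl_cons, List.filter_cons, hx, if_pos trivial, ih,
        pv_filter_add_pos p acc x hx]
    · have hx' : p x = false := by simpa using hx
      simp only [List.foldl_cons, List.filter_cons, hx', ih]
      rw [pv_filter_add_neg p acc x hx']
      simp

-- the loop invariant: A's fold (with its dedup-append written as Set.add) splits into two Set.add folds
theorem pv_split_loop (mkt : String → Bool) :
    ∀ (l : List String) (d m : List String),
      l.foldl
        (fun (acc : List String × List String) s =>
          if s = "" then acc
          else if mkt s then (acc.1, PySem.Set.add acc.2 s)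
          else (PySem.Set.add acc.1 s, acc.2))
        (d, m)
      = ((l.filter (fun s => !(s == "") && !mkt s)).foldl PySem.Set.add d,
         (l.filter (fun s => !(s == "") && mkt s)).foldl PySem.Set.add m) := by
  intro l
  induction l with
  | nil => intro d m; rfl
  | cons x t ih =>
    intro d m
    by_cases hx : x = ""
    · simp [hx, ih]
    · by_cases hm : mkt x = true
      · simp [hx, hm, ih]
      · have hm' : mkt x = false := by simpa using hm
        simp [hx, hm', ih]

-- ===== VERDICT (by name: the statement is the Claim_ definition above) =====
theorem split_sources_spec : Claim_equal_split_sources := by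
  intro source_types _
  unfold Spec_split_sources split_sources split_sources_alt
  have hstep : (fun (acc : List String × List String) source_type =>
        let source := PySem.Str.lower (PySem.Str.strip source_type)
        if source = "" then acc
        else if is_market_source source then
          (acc.1, if source ∈ acc.2 then acc.2 else acc.2 ++ [source])
        else
          (if source ∈ acc.1 then acc.1 else acc.1 ++ [source], acc.2))
      = (fun (acc : List String × List String) st =>
          if PySem.Str.lower (PySem.Str.strip st) = "" then acc
          else if is_market_source (PySem.Str.lower (PySem.Str.strip st)) then
            (acc.1, PySem.Set.add acc.2 (PySem.Str.lower (PySem.Str.strip st)))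
          else (PySem.Set.add acc.1 (PySem.Str.lower (PySem.Str.strip st)), acc.2)) := by
    funext acc st
    simp [pv_mem_append_eq_add]
  rw [hstep,
    ← List.foldl_map (f := fun st => PySem.Str.lower (PySem.Str.strip st))
      (g := fun (acc : List String × List String) s =>
        if s = "" then acc
        else if is_market_source s then (acc.1, PySem.Set.add acc.2 s)
        else (PySem.Set.add acc.1 s, acc.2)),
    pv_split_loop]
  set mapped := source_types.map (fun st => PySem.Str.lower (PySem.Str.strip st)) with hmap
  have h1 : mapped.filter (fun s => !(s == "") && !is_market_source s)
      = (mapped.filter (fun s => !(s == ""))).filter (fun s => !is_market_source s) := by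
    rw [List.filter_filter]
    apply List.filter_congr
    intro x _
    simp [is_market_source, is_market_source, Bool.and_comm]
  have h2 : mapped.filter (fun s => !(s == "") && is_market_source s)
      = (mapped.filter (fun s => !(s == ""))).filter (fun s => is_market_source s) := by
    rw [List.filter_filter]
    apply List.filter_congr
    intro x _
    simp [is_market_source, is_market_source, Bool.and_comm]
  simp only [PySem.List.dedup_eq_ofList, PySem.Set.ofList_eq_foldl,
    pv_filter_foldl_add, List.filter_nil, h1, h2]
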